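-- pv_equiv track=rewrite | github.com/OrnateNt2/IVS | main.py | encode_12bit_value
-- ===== SOURCE A (Python) =====
-- def calculate_parity(bits):
--     """Функция вычисления 3-битной функции от предыдущих 5 битов."""
--     parity = 0
--     for bit in bits:
--         parity ^= bit  # XOR всех битов для чётности
--
--     return parity & 0x7  # Оставляем только 3 младших бита
--
-- def encode_12bit_value(value):
--     """Функция кодирования 12-битного значения в три 8-битных байта."""
--     if value > 0xFFF:
--         raise ValueError("Значение должно быть 12-битным (от 0 до 4095)")
--
--     # Разбиваем 12-битное значение на три части по 4 бита
--     parts = [(value >> 8) & 0xF, (value >> 4) & 0xF, value & 0xF]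
--
--     encoded_bytes = []
--
--     for part in parts:
--         # Формируем байт:
--         # 1-бит проверки, 4 бита данных, 3 бита функции (чётности)
--         byte = (1 << 7) | (part << 3)  # Первые 5 битов (1 + данные)
--
--         # Вычисляем последние 3 бита функции
--         first_5_bits = [(byte >> i) & 1 for i in range(7, 2, -1)]  # Разбиваем на отдельные биты
--         parity = calculate_parity(first_5_bits)
--
--         # Добавляем три бита функции (чётности)
--         byte |= parity
--
--         encoded_bytes.append(byte)
--
--     return encoded_bytes
-- ===== SOURCE B (Python) =====
-- def encode_12bit_value(value):
--     """Closed-form re-implementation: the 3 parity bits equal 1 ^ parity(part),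
--     read from the 16-bit nibble-parity table 0x6996."""
--     if value > 0xFFF:
--         raise ValueError("Значение должно быть 12-битным (от 0 до 4095)")
--     parts = ((value >> 8) & 0xF, (value >> 4) & 0xF, value & 0xF)
--     return [0x80 | (p << 3) | (1 ^ ((0x6996 >> p) & 1)) for p in parts]
-- ===== Notes on version B (the rewrite author's own statement) =====
-- stated objective: simpler
-- what changed: Replaced the per-byte bit-extraction loop and the XOR-fold calculate_parity helper by a single closed-form expression per nibble that reads the parity bit out of the nibble-parity table constant 0x6996.
import Mathlib
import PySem

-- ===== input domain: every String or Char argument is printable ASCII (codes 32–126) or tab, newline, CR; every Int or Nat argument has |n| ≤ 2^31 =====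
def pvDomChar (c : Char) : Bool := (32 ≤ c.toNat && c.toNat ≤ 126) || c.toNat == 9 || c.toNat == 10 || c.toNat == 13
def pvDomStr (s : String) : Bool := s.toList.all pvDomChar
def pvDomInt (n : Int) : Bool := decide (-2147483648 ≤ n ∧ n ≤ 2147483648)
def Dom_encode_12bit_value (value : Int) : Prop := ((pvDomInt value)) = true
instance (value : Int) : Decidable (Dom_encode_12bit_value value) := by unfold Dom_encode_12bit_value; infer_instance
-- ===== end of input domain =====

-- B replaces A's per-bit extraction loop and XOR-fold helper by a closed-form byte
-- expression reading the parity from the nibble-parity table 0x6996 (objective: simpler).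

-- ===== PORT A =====
def calculate_parity (bits : List Int) : Int :=
  PySem.Int.band (bits.foldl (fun parity bit => PySem.Int.bxor parity bit) 0) 0x7

def encode_12bit_value (value : Int) : List Int :=
  if 0xFFF < value then []  -- Python raises ValueError here; excluded by Pre_
  else
    let parts : List Int :=
      [PySem.Int.band (value >>> 8) 0xF, PySem.Int.band (value >>> 4) 0xF,
       PySem.Int.band value 0xF]
    parts.foldl (fun (encoded_bytes : List Int) (part : Int) =>
      let byte := PySem.Int.bor ((1:Int) <<< 7) (part <<< 3)
      let first_5_bits := (PySem.List.pyRange 7 2 (-1)).map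
        (fun i => PySem.Int.band (byte >>> i.toNat) 1)
      let parity := calculate_parity first_5_bits
      encoded_bytes ++ [PySem.Int.bor byte parity]) []

-- ===== PORT B =====
def encode_12bit_value_alt (value : Int) : List Int :=
  if 0xFFF < value then []  -- Python raises ValueError here; excluded by Pre_
  else
    let parts : List Int :=
      [PySem.Int.band (value >>> 8) 0xF, PySem.Int.band (value >>> 4) 0xF,
       PySem.Int.band value 0xF]
    parts.map (fun (p : Int) =>
      PySem.Int.bor (PySem.Int.bor 0x80 (p <<< 3))
        (PySem.Int.bxor 1 (PySem.Int.band ((0x6996:Int) >>> p.toNat) 1)))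

-- ===== PRECONDITION & SPEC =====
-- Pre_ excludes exactly the inputs where A raises ValueError (value > 0xFFF).
def Pre_encode_12bit_value (value : Int) : Prop := value ≤ 0xFFF
instance (value : Int) : Decidable (Pre_encode_12bit_value value) := by
  unfold Pre_encode_12bit_value; infer_instance

def pvWitness_encode_12bit_value : Int := 2730

def Spec_encode_12bit_value (value : Int) (out : List Int) : Prop := out = encode_12bit_value_alt value
instance (value : Int) (out : List Int) : Decidable (Spec_encode_12bit_value value out) := by unfold Spec_encode_12bit_value; infer_instance

-- ===== CLAIM (what is proved, stated in full; the proofs are below) =====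
def Claim_equal_encode_12bit_value : Prop := ∀ (value : Int), Dom_encode_12bit_value value → Pre_encode_12bit_value value → Spec_encode_12bit_value value (encode_12bit_value value)

-- ===== LEMMAS AND PROOFS =====

-- x & 0xF is x mod 16 (Python floor mod), for every integer x.
theorem band_fifteen_eq_mod (x : Int) : PySem.Int.band x 15 = PySem.Int.mod x 16 := by
  rw [PySem.Int.mod_eq_emod_of_pos (by norm_num : (0:Int) < 16)]
  rcases x with m | m
  · simp [PySem.Int.band]
    have h := Nat.and_two_pow_sub_one_eq_mod m 4
    norm_num at h
    rw [h]
    omega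
  · simp [PySem.Int.band]
    have h := Nat.and_two_pow_sub_one_eq_mod m 4
    norm_num at h
    rw [Nat.and_comm, h, Int.negSucc_eq]
    omega

-- the per-nibble bytes of A and B agree for every p ∈ [0, 16)
theorem byte_eq (p : Int) (h0 : 0 ≤ p) (h1 : p < 16) :
    PySem.Int.bor (PySem.Int.bor ((1:Int) <<< 7) (p <<< 3))
      (calculate_parity ((PySem.List.pyRange 7 2 (-1)).map
        (fun i => PySem.Int.band ((PySem.Int.bor ((1:Int) <<< 7) (p <<< 3)) >>> i.toNat) 1)))
    = PySem.Int.bor (PySem.Int.bor 0x80 (p <<< 3))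
        (PySem.Int.bxor 1 (PySem.Int.band ((0x6996:Int) >>> p.toNat) 1)) := by
  interval_cases p <;> decide

theorem main (value : Int) (hp : value ≤ 0xFFF) :
    encode_12bit_value value = encode_12bit_value_alt value := by
  have key : ∀ x : Int,
      PySem.Int.bor (PySem.Int.bor ((1:Int) <<< 7) ((PySem.Int.band x 15) <<< 3))
        (calculate_parity ((PySem.List.pyRange 7 2 (-1)).map
          (fun i => PySem.Int.band
            ((PySem.Int.bor ((1:Int) <<< 7) ((PySem.Int.band x 15) <<< 3)) >>> i.toNat) 1)))
      = PySem.Int.bor (PySem.Int.bor 0x80 ((PySem.Int.band x 15) <<< 3))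
          (PySem.Int.bxor 1 (PySem.Int.band ((0x6996:Int) >>> (PySem.Int.band x 15).toNat) 1)) := by
    intro x
    have h := band_fifteen_eq_mod x
    exact byte_eq _ (by rw [h]; exact PySem.Int.mod_nonneg x (by norm_num))
      (by rw [h]; exact PySem.Int.mod_lt x (by norm_num))
  unfold encode_12bit_value encode_12bit_value_alt
  rw [if_neg (by omega), if_neg (by omega)]
  simp only [List.foldl, List.map, List.nil_append, List.cons_append, key]

-- ===== VERDICT (by name: the statement is the Claim_ definition above) =====
theorem encode_12bit_value_spec : Claim_equal_encode_12bit_value := by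
  intro value _ hp
  unfold Spec_encode_12bit_value
  exact main value hp
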